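-- pv_equiv track=rewrite | github.com/PaulineGHG/pathmodel | Files/try_convert_input.py | simplify_list_with_index
-- ===== SOURCE A (Python) =====
-- def simplify_list_with_index(lst):
--     result = {}
--     start = 0
--     for i, a in enumerate(lst):
--         if a != lst[start]:
--             value = lst[start]
--             if value not in result:
--                 result[value] = []
--             result[value].append((start + 1, i))
--             start = i
--     value = lst[start]
--     if value not in result:
--         result[value] = []
--     result[value].append((start + 1, len(lst)))
--     return result
-- ===== SOURCE B (Python) =====
-- def simplify_list_with_index(lst):
--     boundaries = [0] + [i for i in range(1, len(lst)) if lst[i] != lst[i - 1]] + [len(lst)]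
--     result = {}
--     for s, e in zip(boundaries, boundaries[1:]):
--         result.setdefault(lst[s], []).append((s + 1, e))
--     return result
-- ===== Notes on version B (the rewrite author's own statement) =====
-- stated objective: alternative
-- what changed: B first computes the list of run boundaries (indices where the value changes) and then emits one (start+1,end) range per consecutive boundary pair, instead of A's single stateful scan that carries a moving run-start and emits ranges inside the loop; Pre_ excludes the empty list, on which both Pythons raise IndexError.
import Mathlib
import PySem

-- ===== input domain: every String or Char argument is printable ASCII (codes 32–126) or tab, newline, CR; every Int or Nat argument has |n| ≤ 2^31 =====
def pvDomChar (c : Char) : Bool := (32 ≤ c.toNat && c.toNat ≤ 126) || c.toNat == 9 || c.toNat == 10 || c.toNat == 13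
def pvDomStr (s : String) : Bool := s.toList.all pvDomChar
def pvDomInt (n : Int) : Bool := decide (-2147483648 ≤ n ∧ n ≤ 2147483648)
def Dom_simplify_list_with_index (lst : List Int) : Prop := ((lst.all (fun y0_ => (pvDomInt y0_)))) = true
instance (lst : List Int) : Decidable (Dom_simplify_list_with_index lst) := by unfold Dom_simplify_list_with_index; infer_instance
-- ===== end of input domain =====

-- B re-implements A by computing the run boundaries first and then emitting one range per
-- consecutive boundary pair, instead of A's stateful scan; equal on Pre_ (nonempty lists;
-- on [] both Pythons raise IndexError).

-- shared transliteration of the dict update both Pythons perform: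
-- A: "if value not in result: result[value] = []; result[value].append((s+1, e))"
-- B: "result.setdefault(lst[s], []).append((s+1, e))"
-- (insert keeps an existing key's position and appends a new key, exactly like Python's dict)
def pvEmit (lst : List Int) (d : PySem.Dict Int (List (Int × Int))) (s e : Nat) :
    PySem.Dict Int (List (Int × Int)) :=
  d.insert (lst.getD s 0) (d.getD (lst.getD s 0) [] ++ [((s : Int) + 1, (e : Int))])

-- ===== PORT A =====
-- loop body of A: state = (result, start); `a != lst[start]` with `a = lst[i]`
-- (indices are always in range here for nonempty lst, so getD is exact; [] is outside Pre_)
def pvAStep (lst : List Int) (st : PySem.Dict Int (List (Int × Int)) × Nat) (i : Nat) :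
    PySem.Dict Int (List (Int × Int)) × Nat :=
  if lst.getD i 0 ≠ lst.getD st.2 0 then (pvEmit lst st.1 st.2 i, i) else st

def simplify_list_with_index (lst : List Int) : List (Int × List (Int × Int)) :=
  let fin := (List.range lst.length).foldl (pvAStep lst) (PySem.Dict.empty, 0)
  (pvEmit lst fin.1 fin.2 lst.length).items

-- ===== PORT B =====
def simplify_list_with_index_alt (lst : List Int) : List (Int × List (Int × Int)) :=
  let n := lst.length
  -- boundaries = [0] + [i for i in range(1, n) if lst[i] != lst[i-1]] + [n]
  let boundaries : List Nat :=
    [0] ++ (List.range' 1 (n - 1)).filter (fun i => lst.getD i 0 != lst.getD (i - 1) 0) ++ [n]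
  ((boundaries.zip boundaries.tail).foldl
      (fun d (se : Nat × Nat) => pvEmit lst d se.1 se.2) PySem.Dict.empty).items

-- ===== PRECONDITION & SPEC =====
-- Pre_ excludes exactly the empty list, on which Python A raises IndexError (lst[start]).
def Pre_simplify_list_with_index (lst : List Int) : Prop := lst ≠ []
instance (lst : List Int) : Decidable (Pre_simplify_list_with_index lst) := by
  unfold Pre_simplify_list_with_index; infer_instance
def pvWitness_simplify_list_with_index : List Int := [1, 1, 2]

def Spec_simplify_list_with_index (lst : List Int) (out : List (Int × List (Int × Int))) : Prop := out = simplify_list_with_index_alt lst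
instance (lst : List Int) (out : List (Int × List (Int × Int))) : Decidable (Spec_simplify_list_with_index lst out) := by unfold Spec_simplify_list_with_index; infer_instance

-- ===== CLAIM (what is proved, stated in full; the proofs are below) =====
def Claim_equal_simplify_list_with_index : Prop := ∀ (lst : List Int), Dom_simplify_list_with_index lst → Pre_simplify_list_with_index lst → Spec_simplify_list_with_index lst (simplify_list_with_index lst)

-- ===== LEMMAS AND PROOFS =====

-- the cut indices strictly below k (B's inner filter, truncated at k)
def pvCuts (lst : List Int) (k : Nat) : List Nat :=
  (List.range' 1 (k - 1)).filter (fun i => lst.getD i 0 != lst.getD (i - 1) 0)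

-- B's fold over consecutive pairs of a boundary list
def pvSegFold (lst : List Int) (d : PySem.Dict Int (List (Int × Int))) (bs : List Nat) :
    PySem.Dict Int (List (Int × Int)) :=
  (bs.zip bs.tail).foldl (fun d (se : Nat × Nat) => pvEmit lst d se.1 se.2) d

lemma pv_zip_tail_concat (x b : Nat) : ∀ (bs : List Nat),
    (x :: (bs ++ [b])).zip (bs ++ [b]) = ((x :: bs).zip bs) ++ [(bs.getLastD x, b)] := by
  intro bs
  induction bs generalizing x with
  | nil => rfl
  | cons c bs ih =>
      simp only [List.cons_append, List.zip_cons_cons, List.getLastD_cons]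
      rw [ih c]

lemma pv_segFold_concat (lst : List Int) (d : PySem.Dict Int (List (Int × Int)))
    (x b : Nat) (bs : List Nat) :
    pvSegFold lst d (x :: bs ++ [b]) =
      pvEmit lst (pvSegFold lst d (x :: bs)) (bs.getLastD x) b := by
  simp only [pvSegFold, List.cons_append, List.tail_cons]
  rw [pv_zip_tail_concat x b bs, List.foldl_append]
  rfl

lemma pv_cuts_mem_lt (lst : List Int) (k : Nat) : ∀ x ∈ pvCuts lst k, 1 ≤ x ∧ x < k := by
  intro x hx
  simp only [pvCuts, List.mem_filter, List.mem_range'] at hx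
  omega

lemma pv_cuts_last_lt (lst : List Int) (k : Nat) (hk : 1 ≤ k) :
    (pvCuts lst k).getLastD 0 < k := by
  have hmem : (pvCuts lst k).getLastD 0 ∈ 0 :: pvCuts lst k := List.getLastD_mem_cons
  rcases List.mem_cons.mp hmem with h | h
  · omega
  · exact (pv_cuts_mem_lt lst k _ h).2

-- A's loop body, with the `if` restated on equality
lemma pvAStep_eq (lst : List Int) (d : PySem.Dict Int (List (Int × Int))) (s i : Nat) :
    pvAStep lst (d, s) i =
      if lst.getD i 0 = lst.getD s 0 then (d, s) else (pvEmit lst d s i, i) := by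
  simp only [pvAStep, ite_not]

-- main invariant of A's loop: after processing indices < k the dict is B's fold over the
-- boundaries seen so far, start is the last boundary, and the current run is constant
lemma pv_loop_inv (lst : List Int) : ∀ (k : Nat),
    (List.range k).foldl (pvAStep lst) (PySem.Dict.empty, 0) =
      (pvSegFold lst PySem.Dict.empty (0 :: pvCuts lst k), (pvCuts lst k).getLastD 0)
    ∧ ∀ j, (pvCuts lst k).getLastD 0 ≤ j → j < k →
        lst.getD j 0 = lst.getD ((pvCuts lst k).getLastD 0) 0 := by
  intro k
  induction k with
  | zero => exact ⟨rfl, by intro j h1 h2; omega⟩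
  | succ k ih =>
      obtain ⟨hst, hinv⟩ := ih
      rw [List.range_succ, List.foldl_append, hst]
      simp only [List.foldl_cons, List.foldl_nil, pvAStep_eq]
      by_cases hk : k = 0
      · subst hk
        constructor
        · simp [pvCuts]
        · intro j _ hj
          interval_cases j
          rfl
      · -- k ≥ 1
        have hk1 : 1 ≤ k := Nat.one_le_iff_ne_zero.mpr hk
        have hlastlt : (pvCuts lst k).getLastD 0 < k := pv_cuts_last_lt lst k hk1
        have hprev : lst.getD (k - 1) 0 = lst.getD ((pvCuts lst k).getLastD 0) 0 :=
          hinv (k - 1) (by omega) (by omega)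
        have hcuts : pvCuts lst (k + 1) =
            pvCuts lst k ++ (if (lst.getD k 0 != lst.getD (k - 1) 0) = true then [k] else []) := by
          simp only [pvCuts]
          rw [show k + 1 - 1 = (k - 1) + 1 by omega, List.range'_concat, List.filter_append,
            show 1 + 1 * (k - 1) = k by omega, List.filter_singleton]
          simp only [Bool.cond_eq_ite]
        by_cases hne : lst.getD k 0 = lst.getD ((pvCuts lst k).getLastD 0) 0
        · -- no cut at k: state unchanged
          have hcuts' : pvCuts lst (k + 1) = pvCuts lst k := by
            rw [hcuts, bne_eq_false_iff_eq.mpr (by rw [hprev]; exact hne)]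
            simp
          rw [if_pos hne, hcuts']
          refine ⟨rfl, ?_⟩
          intro j hj1 hj2
          rcases Nat.lt_succ_iff_lt_or_eq.mp hj2 with h | h
          · exact hinv j hj1 h
          · subst h; exact hne
        · -- cut at k: emit the closed run and move start to k
          have hcuts' : pvCuts lst (k + 1) = pvCuts lst k ++ [k] := by
            rw [hcuts, bne_iff_ne.mpr (by rw [hprev]; exact hne)]
            simp
          rw [if_neg hne, hcuts']
          constructor
          · rw [show (0 : Nat) :: (pvCuts lst k ++ [k]) = 0 :: pvCuts lst k ++ [k] from rfl,
              pv_segFold_concat lst PySem.Dict.empty 0 k (pvCuts lst k)]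
            simp only [List.getLastD_concat]
          · simp only [List.getLastD_concat]
            intro j hj1 hj2
            have : j = k := by omega
            subst this; rfl

-- ===== VERDICT (by name: the statement is the Claim_ definition above) =====
theorem simplify_list_with_index_spec : Claim_equal_simplify_list_with_index := by
  intro lst _ _
  unfold Spec_simplify_list_with_index
  have halt : simplify_list_with_index_alt lst
      = (pvSegFold lst PySem.Dict.empty (0 :: pvCuts lst lst.length ++ [lst.length])).items := rfl
  rw [halt, pv_segFold_concat lst PySem.Dict.empty 0 lst.length (pvCuts lst lst.length)]
  simp only [simplify_list_with_index]
  rw [(pv_loop_inv lst lst.length).1]
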